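-- pv_equiv track=rewrite | github.com/weiyangzen/awesome_algorithms | Algorithms/数学-算法-0042-快速傅里叶变换乘法_(FFT_Multiplication)/demo.py | carry_normalize
-- ===== SOURCE A (Python) =====
-- from typing import List, Sequence
--
-- BASE = 10_000  # 10^4 keeps coefficients moderate for float FFT rounding.
--
-- def trim_leading_zeros(digits: List[int]) -> List[int]:
--     """Remove high-end zeros while preserving zero representation."""
--     while len(digits) > 1 and digits[-1] == 0:
--         digits.pop()
--     return digits
--
-- def carry_normalize(coeffs: Sequence[int], base: int = BASE) -> List[int]:
--     """Normalize possibly large convolution coefficients into base digits."""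
--     digits: List[int] = []
--     carry = 0
--
--     for coeff in coeffs:
--         total = int(coeff) + carry
--         carry, digit = divmod(total, base)
--         digits.append(digit)
--
--     while carry:
--         carry, digit = divmod(carry, base)
--         digits.append(digit)
--
--     return trim_leading_zeros(digits)
-- ===== SOURCE B (Python) =====
-- def carry_normalize(coeffs, base=10_000):
--     """Normalize possibly large convolution coefficients into base digits."""
--     value = 0
--     for coeff in reversed(coeffs):
--         value = value * base + int(coeff)
--     digits = []
--     while value:
--         value, digit = divmod(value, base)
--         digits.append(digit)
--     if digits:
--         return digits
--     return [0] if coeffs else []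
-- ===== Notes on version B (the rewrite author's own statement) =====
-- stated objective: simpler
-- what changed: B folds the coefficients into one big integer value with Horner's rule over the reversed list and then re-extracts canonical base digits by repeated divmod (with an explicit empty/[0] branch), instead of A's fused per-coefficient carry propagation followed by a residual-carry loop and a trailing-zero trim.
-- outside the precondition, e.g. on carry_normalize([3, -3], 1): A returns [0], B returns [0]; on carry_normalize([], 0): A returns [], B returns []
import Mathlib
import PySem

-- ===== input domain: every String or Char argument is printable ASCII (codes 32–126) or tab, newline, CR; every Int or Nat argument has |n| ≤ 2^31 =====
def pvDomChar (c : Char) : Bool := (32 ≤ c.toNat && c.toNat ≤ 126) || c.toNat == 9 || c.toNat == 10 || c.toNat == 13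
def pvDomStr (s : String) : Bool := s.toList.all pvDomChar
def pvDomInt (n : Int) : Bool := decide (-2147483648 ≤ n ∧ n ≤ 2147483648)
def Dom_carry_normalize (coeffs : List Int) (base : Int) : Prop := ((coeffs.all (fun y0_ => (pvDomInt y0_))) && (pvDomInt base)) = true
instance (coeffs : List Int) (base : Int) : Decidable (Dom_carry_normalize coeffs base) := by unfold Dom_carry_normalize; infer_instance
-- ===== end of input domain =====

-- B replaces A's fused carry pass + residual-carry loop + trailing-zero trim by: Horner-fold the
-- coefficients into one integer, then re-extract its base digits by repeated divmod (objective: simpler).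

-- ===== PORT A =====
-- the `for coeff in coeffs:` pass: state = (digits so far, carry); divmod? is none only for base = 0 (ZeroDivisionError)
def pvMainA : List Int → Int → Int → List Int → Option (List Int × Int)
  | [], carry, _, digits => some (digits, carry)
  | coeff :: rest, carry, base, digits =>
    match PySem.Int.divmod? (coeff + carry) base with
    | none => none
    | some (q, d) => pvMainA rest q base (digits ++ [d])

-- the `while carry:` loop; fuel only makes it total (none = fuel ran out, i.e. the Python loop diverges)
def pvCarryLoopA : Nat → Int → Int → List Int → Option (List Int)
  | 0, _, _, _ => none
  | fuel + 1, carry, base, digits =>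
    if carry = 0 then some digits
    else
      match PySem.Int.divmod? carry base with
      | none => none
      | some (q, d) => pvCarryLoopA fuel q base (digits ++ [d])

-- trim_leading_zeros: `while len(digits) > 1 and digits[-1] == 0: digits.pop()`
def pvTrimA (digits : List Int) : List Int :=
  if 1 < digits.length ∧ PySem.List.pyGet? digits (-1) = some 0 then pvTrimA digits.dropLast
  else digits
termination_by digits.length
decreasing_by simp_all [List.length_dropLast]; omega

def carry_normalize (coeffs : List Int) (base : Int) : List Int :=
  match pvMainA coeffs 0 base [] with
  | none => []
  | some (digits, carry) =>
    match pvCarryLoopA (carry.natAbs + 2) carry base digits with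
    | none => []
    | some digits => pvTrimA digits

-- ===== PORT B =====
-- `value = 0; for coeff in reversed(coeffs): value = value * base + coeff`
def pvHornerB : List Int → Int → Int → Int
  | [], _, value => value
  | coeff :: rest, base, value => pvHornerB rest base (value * base + coeff)

-- `while value: value, digit = divmod(value, base); digits.append(digit)`; fuel only makes it total
def pvDigitsB : Nat → Int → Int → List Int → Option (List Int)
  | 0, _, _, _ => none
  | fuel + 1, value, base, digits =>
    if value = 0 then some digits
    else
      match PySem.Int.divmod? value base with
      | none => none
      | some (q, d) => pvDigitsB fuel q base (digits ++ [d])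

def carry_normalize_alt (coeffs : List Int) (base : Int) : List Int :=
  let value := pvHornerB coeffs.reverse base 0
  match pvDigitsB (value.natAbs + 2) value base [] with
  | none => []
  | some digits => if digits ≠ [] then digits else if coeffs ≠ [] then [0] else []

-- ===== PRECONDITION & SPEC =====
-- positional (little-endian) value of a digit list: sum digits[i] * base^i
def pvVal (base : Int) : List Int → Int
  | [] => 0
  | d :: rest => d + base * pvVal base rest

-- Pre_ excludes the degenerate bases -1, 0, 1 — there A raises ZeroDivisionError (base 0, non-empty
-- input) or its carry loop diverges, except on corner inputs of total value zero where both programs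
-- return the same answer — and, for base ≥ 2, the inputs of negative total value, on which A's
-- carry loop diverges (A never returns there).
def Pre_carry_normalize (coeffs : List Int) (base : Int) : Prop :=
  (2 ≤ base ∧ 0 ≤ pvVal base coeffs) ∨ base ≤ -2
instance (coeffs : List Int) (base : Int) : Decidable (Pre_carry_normalize coeffs base) := by
  unfold Pre_carry_normalize; infer_instance

def pvWitness_carry_normalize : List Int × Int := ([123, 20456, 7], 10000)

def Spec_carry_normalize (coeffs : List Int) (base : Int) (out : List Int) : Prop := out = carry_normalize_alt coeffs base
instance (coeffs : List Int) (base : Int) (out : List Int) : Decidable (Spec_carry_normalize coeffs base out) := by unfold Spec_carry_normalize; infer_instance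

-- ===== CLAIM (what is proved, stated in full; the proofs are below) =====
def Claim_equal_carry_normalize : Prop := ∀ (coeffs : List Int) (base : Int), Dom_carry_normalize coeffs base → Pre_carry_normalize coeffs base → Spec_carry_normalize coeffs base (carry_normalize coeffs base)

-- ===== LEMMAS AND PROOFS =====

-- a digit produced by divmod(·, base): in [0, base) for base > 0, in (base, 0] for base < 0
def pvDig (base d : Int) : Prop :=
  (0 < base ∧ 0 ≤ d ∧ d < base) ∨ (base < 0 ∧ base < d ∧ d ≤ 0)

-- canonical tail: a trailing zero digit only in the representation [0] of zero
def pvCanon (D : List Int) : Prop := ∀ (h : D ≠ []), D.getLast h = 0 → D = [0]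

theorem pv_divmod_eq (a b : Int) (hb : b ≠ 0) :
    PySem.Int.divmod? a b = some (PySem.Int.floordiv a b, PySem.Int.mod a b) := by
  simp [PySem.Int.divmod?, PySem.Int.floordiv, PySem.Int.mod, hb]

theorem pvDig_of_mod (b a : Int) (hb : b ≠ 0) : pvDig b (PySem.Int.mod a b) := by
  rcases lt_or_gt_of_ne hb with h | h
  · exact Or.inr ⟨h, PySem.Int.mod_neg_bounds a h⟩
  · exact Or.inl ⟨h, PySem.Int.mod_nonneg a h, PySem.Int.mod_lt a h⟩

theorem pvDig_zero (b : Int) (hb : b ≠ 0) : pvDig b (0:Int) := by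
  rcases lt_or_gt_of_ne hb with h | h
  · exact Or.inr ⟨h, h, le_refl 0⟩
  · exact Or.inl ⟨h, le_refl 0, h⟩

theorem pvVal_append (b : Int) (X Y : List Int) :
    pvVal b (X ++ Y) = pvVal b X + b ^ X.length * pvVal b Y := by
  induction X with
  | nil => simp [pvVal]
  | cons x t ih => simp [pvVal, ih, pow_succ]; ring

theorem pvVal_bounds (b : Int) (hb : 2 ≤ b) (D : List Int) (hd : ∀ d ∈ D, pvDig b d) :
    0 ≤ pvVal b D ∧ pvVal b D < b ^ D.length := by
  induction D with
  | nil => simp [pvVal]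
  | cons d t ih =>
    have hdig := hd d (by simp)
    have ht := ih (fun x hx => hd x (by simp [hx]))
    rcases hdig with ⟨_, h1, h2⟩ | ⟨h, _⟩
    · constructor
      · have : 0 ≤ b * pvVal b t := mul_nonneg (by omega) ht.1
        simp only [pvVal]; omega
      · have h3 : b * pvVal b t ≤ b * (b ^ t.length - 1) := by
          have := ht.2; nlinarith
        simp only [pvVal, List.length_cons, pow_succ]; nlinarith
    · omega

-- pvMainA never fails for base ≠ 0 and computes in-range digits of the right positional value
theorem pvMainA_spec (b : Int) (hb : b ≠ 0) :
    ∀ (coeffs : List Int) (c : Int) (acc : List Int),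
    ∃ D cf, pvMainA coeffs c b acc = some (acc ++ D, cf) ∧
      D.length = coeffs.length ∧ (∀ d ∈ D, pvDig b d) ∧
      pvVal b D + cf * b ^ coeffs.length = c + pvVal b coeffs := by
  intro coeffs
  induction coeffs with
  | nil => intro c acc; exact ⟨[], c, by simp [pvMainA, pvVal]⟩
  | cons x rest ih =>
    intro c acc
    obtain ⟨D, cf, h1, h2, h3, h4⟩ := ih (PySem.Int.floordiv (x + c) b) (acc ++ [PySem.Int.mod (x + c) b])
    refine ⟨PySem.Int.mod (x + c) b :: D, cf, ?_, by simp [h2], ?_, ?_⟩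
    · simp only [pvMainA, pv_divmod_eq _ _ hb]
      simpa using h1
    · intro d hd
      rcases List.mem_cons.1 hd with rfl | hd
      · exact pvDig_of_mod b (x + c) hb
      · exact h3 d hd
    · have hid := PySem.Int.floordiv_mul_add_mod (x + c) b
      simp only [pvVal, List.length_cons, pow_succ]
      linear_combination b * h4 + hid

theorem pvCarryLoopA_zero (f : Nat) (b : Int) (acc : List Int) :
    pvCarryLoopA (f + 1) 0 b acc = some acc := by
  simp [pvCarryLoopA]

theorem pvCarryLoopA_step (f : Nat) (c b : Int) (acc : List Int) (hc : c ≠ 0) (hb : b ≠ 0) :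
    pvCarryLoopA (f + 1) c b acc
      = pvCarryLoopA f (PySem.Int.floordiv c b) b (acc ++ [PySem.Int.mod c b]) := by
  simp [pvCarryLoopA, hc, pv_divmod_eq _ _ hb]

-- whatever the loop returns is acc ++ a canonical in-range digit list of value c
theorem pvCarryLoopA_sound (b : Int) (hb : b ≠ 0) :
    ∀ (f : Nat) (c : Int) (acc r : List Int), pvCarryLoopA f c b acc = some r →
    ∃ D, r = acc ++ D ∧ pvVal b D = c ∧ (∀ d ∈ D, pvDig b d) ∧
      (D = [] ↔ c = 0) ∧ (∀ (h : D ≠ []), D.getLast h ≠ 0) := by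
  intro f
  induction f with
  | zero => intro c acc r h; simp [pvCarryLoopA] at h
  | succ f ih =>
    intro c acc r h
    by_cases hc : c = 0
    · refine ⟨[], ?_, by simp [pvVal, hc], by simp, by simp [hc], by simp⟩
      rw [hc, pvCarryLoopA_zero] at h
      simp at h; simp [h]
    · rw [pvCarryLoopA_step f c b acc hc hb] at h
      obtain ⟨D, rfl, h2, h3, h4, h5⟩ := ih _ _ _ h
      have hid := PySem.Int.floordiv_mul_add_mod c b
      refine ⟨PySem.Int.mod c b :: D, by simp, ?_, ?_, by simp [hc], ?_⟩
      · simp only [pvVal]; linear_combination b * h2 + hid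
      · intro d hd
        rcases List.mem_cons.1 hd with rfl | hd
        · exact pvDig_of_mod b c hb
        · exact h3 d hd
      · intro _ hlast
        by_cases hD : D = []
        · subst hD
          have hq0 : PySem.Int.floordiv c b = 0 := by rw [← h2]; rfl
          rw [hq0] at hid
          simp [List.getLast] at hlast
          omega
        · rw [List.getLast_cons hD] at hlast
          exact h5 hD hlast

-- |c // b| < |c| except c = 0 and the flip 1 // (negative b) = -1
theorem pv_fdiv_shrink (b c : Int) (hb : 2 ≤ b ∨ b ≤ -2) (hc : c ≠ 0)
    (hpos : 0 < b → 0 ≤ c) (hone : ¬(b ≤ -2 ∧ c = 1)) :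
    (PySem.Int.floordiv c b).natAbs < c.natAbs := by
  have hid := PySem.Int.floordiv_mul_add_mod c b
  set q := PySem.Int.floordiv c b with hq
  set r := PySem.Int.mod c b with hr
  rcases hb with hb | hb
  · have hr1 : 0 ≤ r := PySem.Int.mod_nonneg c (by omega)
    have hr2 : r < b := PySem.Int.mod_lt c (by omega)
    have hc0 : 0 < c := by have := hpos (by omega); omega
    have hq0 : 0 ≤ q := by nlinarith
    have : q < c := by nlinarith
    omega
  · have hrb : b < r ∧ r ≤ 0 := PySem.Int.mod_neg_bounds c (by omega)
    rcases lt_or_gt_of_ne hc with hcneg | hcpos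
    · -- c < 0, b < 0: 0 ≤ q < -c
      have hq0 : 0 ≤ q := by nlinarith [hrb.1, hrb.2]
      have : q < -c := by nlinarith [hrb.1, hrb.2]
      omega
    · -- c ≥ 2 (c ≠ 1), b < 0: -c < q < 0
      have hc2 : 2 ≤ c := by
        rcases Int.lt_iff_add_one_le.mp hcpos with h
        by_contra hcon
        exact hone ⟨hb, by omega⟩
      have hq0 : q < 0 := by nlinarith [hrb.1, hrb.2]
      have : -c < q := by nlinarith [hrb.1, hrb.2]
      omega

-- under Pre_'s base/sign condition the loop returns within natAbs + 2 steps
theorem pvCarryLoopA_term (b : Int) :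
    ∀ (n : Nat) (c : Int) (acc : List Int), c.natAbs ≤ n →
    ((2 ≤ b ∧ 0 ≤ c) ∨ b ≤ -2) →
    ∃ r, pvCarryLoopA (n + 2) c b acc = some r := by
  intro n
  induction n using Nat.strong_induction_on with
  | _ n ih =>
    intro c acc hn hcond
    have hb : b ≠ 0 := by rcases hcond with ⟨h, _⟩ | h <;> omega
    by_cases hc : c = 0
    · subst hc; exact ⟨acc, pvCarryLoopA_zero _ _ _⟩
    · have hn1 : 1 ≤ n := by omega
      by_cases hflip : b ≤ -2 ∧ c = 1
      · -- 1 → -1 → 0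
        obtain ⟨hbneg, rfl⟩ := hflip
        have h1 : PySem.Int.floordiv 1 b = -1 := by
          have hid := PySem.Int.floordiv_mul_add_mod 1 b
          have hrb := PySem.Int.mod_neg_bounds 1 (show b < 0 by omega)
          nlinarith [hid, hrb.1, hrb.2]
        have h2 : PySem.Int.floordiv (-1) b = 0 := by
          have hid := PySem.Int.floordiv_mul_add_mod (-1) b
          have hrb := PySem.Int.mod_neg_bounds (-1) (show b < 0 by omega)
          nlinarith [hid, hrb.1, hrb.2]
        obtain ⟨m, rfl⟩ : ∃ m, n = m + 1 := ⟨n - 1, by omega⟩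
        refine ⟨acc ++ [PySem.Int.mod 1 b] ++ [PySem.Int.mod (-1) b], ?_⟩
        rw [show m + 1 + 2 = (m + 2) + 1 from rfl,
            pvCarryLoopA_step _ _ _ _ (by omega) hb, h1,
            show m + 2 = (m + 1) + 1 from rfl,
            pvCarryLoopA_step _ _ _ _ (by omega) hb, h2,
            pvCarryLoopA_zero]
      · have hshrink : (PySem.Int.floordiv c b).natAbs < c.natAbs :=
          pv_fdiv_shrink b c
            (by rcases hcond with ⟨h, _⟩ | h; exact Or.inl h; exact Or.inr h) hc
            (by rcases hcond with ⟨_, h⟩ | h <;> intro hb0 <;> omega) hflip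
        have hqcond : (2 ≤ b ∧ 0 ≤ PySem.Int.floordiv c b) ∨ b ≤ -2 := by
          rcases hcond with ⟨h1, h2⟩ | h
          · left; refine ⟨h1, ?_⟩
            have hid := PySem.Int.floordiv_mul_add_mod c b
            have hr2 : PySem.Int.mod c b < b := PySem.Int.mod_lt c (by omega)
            nlinarith
          · exact Or.inr h
        obtain ⟨r, hr⟩ := ih (n - 1) (by omega) (PySem.Int.floordiv c b)
          (acc ++ [PySem.Int.mod c b]) (by omega) hqcond
        refine ⟨r, ?_⟩
        rw [show n + 2 = (n - 1 + 2) + 1 by omega, pvCarryLoopA_step _ _ _ _ hc hb]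
        exact hr

-- B's extraction loop is the same recursion as A's carry loop
theorem pvDigitsB_eq (f : Nat) : ∀ (v b : Int) (acc : List Int),
    pvDigitsB f v b acc = pvCarryLoopA f v b acc := by
  induction f with
  | zero => intro v b acc; rfl
  | succ f ih =>
    intro v b acc
    simp only [pvDigitsB, pvCarryLoopA]
    by_cases hv : v = 0
    · simp [hv]
    · simp only [hv, ite_false]
      cases PySem.Int.divmod? v b with
      | none => rfl
      | some qd => exact ih _ _ _

-- Horner over the reversed list computes the positional value
theorem pvHornerB_spec (b : Int) : ∀ (l : List Int) (v : Int),
    pvHornerB l b v = v * b ^ l.length + pvVal b l.reverse := by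
  intro l
  induction l with
  | nil => intro v; simp [pvHornerB, pvVal]
  | cons c rest ih =>
    intro v
    simp only [pvHornerB, ih, List.reverse_cons, pvVal_append, List.length_reverse,
      List.length_cons, pvVal]
    ring

theorem pvHornerB_val (b : Int) (coeffs : List Int) :
    pvHornerB coeffs.reverse b 0 = pvVal b coeffs := by
  simp [pvHornerB_spec]

-- trim: value preserved, members preserved, canonical result, emptiness preserved
theorem pvTrimA_spec (b : Int) : ∀ (D : List Int),
    pvVal b (pvTrimA D) = pvVal b D ∧ (∀ d ∈ pvTrimA D, d ∈ D) ∧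
    pvCanon (pvTrimA D) ∧ (pvTrimA D = [] ↔ D = []) := by
  intro D
  induction D using pvTrimA.induct with
  | case1 D hcond ih =>
    have hne : D ≠ [] := by intro h; subst h; simp at hcond
    have hlast0 : D.getLast hne = 0 := by
      have := hcond.2
      rw [PySem.List.pyGet?_neg_one] at this
      rw [List.getLast?_eq_getLast hne] at this
      exact Option.some_injective _ this
    have hDeq : D.dropLast ++ [0] = D := by
      rw [← hlast0]; exact List.dropLast_append_getLast hne
    have htrim : pvTrimA D = pvTrimA D.dropLast := by
      rw [pvTrimA]; simp [hcond]
    obtain ⟨ihv, ihm, ihc, ihe⟩ := ih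
    refine ⟨?_, ?_, by rwa [htrim], ?_⟩
    · rw [htrim, ihv, ← hDeq, pvVal_append]
      simp [pvVal]
    · intro d hd
      rw [htrim] at hd
      exact List.dropLast_subset D (ihm d hd)
    · rw [htrim, ihe]
      constructor
      · intro h
        have hl2 := hcond.1
        have hdl : D.dropLast.length = D.length - 1 := List.length_dropLast
        rw [h] at hdl
        simp at hdl
        omega
      · intro h; subst h; simp at hcond
  | case2 D hcond =>
    have htrim : pvTrimA D = D := by rw [pvTrimA]; simp [hcond]
    refine ⟨by rw [htrim], by intro d hd; rwa [htrim] at hd, ?_, by rw [htrim]⟩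
    rw [htrim]
    intro hne hlast
    have hget : PySem.List.pyGet? D (-1) = some 0 := by
      rw [PySem.List.pyGet?_neg_one, List.getLast?_eq_getLast hne, hlast]
    have hlen : ¬ 1 < D.length := by
      intro hl; exact hcond ⟨hl, hget⟩
    have : D.length = 1 := by
      have : D.length ≠ 0 := by simpa [List.length_eq_zero_iff] using hne
      omega
    obtain ⟨a, rfl⟩ := List.length_eq_one_iff.mp this
    simp [List.getLast] at hlast
    simp [hlast]

-- two in-range digits congruent mod b are equal
theorem pvDig_unique (b d e : Int) (hd : pvDig b d) (he : pvDig b e) (hdvd : b ∣ d - e) : d = e := by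
  obtain ⟨k, hk⟩ := hdvd
  rcases hd with ⟨h1, h2, h3⟩ | ⟨h1, h2, h3⟩ <;> rcases he with ⟨g1, g2, g3⟩ | ⟨g1, g2, g3⟩
  · have hk0 : k = 0 := by
      rcases lt_trichotomy k 0 with h | h | h
      · nlinarith
      · exact h
      · nlinarith
    rw [hk0, mul_zero] at hk; omega
  · omega
  · omega
  · have hk0 : k = 0 := by
      rcases lt_trichotomy k 0 with h | h | h
      · nlinarith
      · exact h
      · nlinarith
    rw [hk0, mul_zero] at hk; omega

-- an in-range digit list of value 0 is all zeros
theorem pvVal_zero_all (b : Int) (hb : b ≠ 0) : ∀ (D : List Int), (∀ d ∈ D, pvDig b d) →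
    pvVal b D = 0 → ∀ d ∈ D, d = 0 := by
  intro D
  induction D with
  | nil => simp
  | cons d t ih =>
    intro hd hv e he
    have hd0 : d = 0 := by
      apply pvDig_unique b d 0 (hd d (by simp)) (pvDig_zero b hb)
      refine ⟨-(pvVal b t), ?_⟩
      simp only [pvVal] at hv
      linarith
    have hvt : pvVal b t = 0 := by
      simp only [pvVal, hd0, zero_add] at hv
      exact (mul_eq_zero.mp hv).resolve_left hb
    rcases List.mem_cons.1 he with rfl | he
    · exact hd0
    · exact ih (fun x hx => hd x (by simp [hx])) hvt e he

theorem pvCanon_tail (d : Int) (D : List Int) (h : pvCanon (d :: D)) : pvCanon D := by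
  intro hne hlast
  have h1 : (d :: D).getLast (by simp) = 0 := by
    rw [List.getLast_cons hne]; exact hlast
  have := h (by simp) h1
  simp at this
  exact absurd this.2 hne

-- uniqueness of canonical in-range representations
theorem pvRep_unique (b : Int) (hb : b ≠ 0) : ∀ (D E : List Int),
    (∀ d ∈ D, pvDig b d) → (∀ d ∈ E, pvDig b d) → pvCanon D → pvCanon E →
    pvVal b D = pvVal b E → (D = [] ↔ E = []) → D = E := by
  intro D
  induction D with
  | nil =>
    intro E _ _ _ _ _ hiff
    exact (hiff.mp rfl).symm
  | cons d D' ih =>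
    intro E hdD hdE hcD hcE hval hiff
    cases E with
    | nil => exact absurd (hiff.mpr rfl) (by simp)
    | cons e E' =>
      simp only [pvVal] at hval
      have hde : d = e := by
        apply pvDig_unique b d e (hdD d (by simp)) (hdE e (by simp))
        exact ⟨pvVal b E' - pvVal b D', by linarith [hval]⟩
      have hval' : pvVal b D' = pvVal b E' := by
        have : b * pvVal b D' = b * pvVal b E' := by omega
        exact mul_left_cancel₀ hb this
      have hiff' : (D' = [] ↔ E' = []) := by
        constructor
        · intro h
          by_contra hE'
          have hE'val : pvVal b E' = 0 := by rw [← hval', h]; rfl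
          have hall := pvVal_zero_all b hb E' (fun x hx => hdE x (by simp [hx])) hE'val
          have hlast : (e :: E').getLast (by simp) = 0 := by
            rw [List.getLast_cons hE']
            exact hall _ (List.getLast_mem hE')
          have := hcE (by simp) hlast
          simp at this
          exact hE' this.2
        · intro h
          by_contra hD'
          have hD'val : pvVal b D' = 0 := by rw [hval', h]; rfl
          have hall := pvVal_zero_all b hb D' (fun x hx => hdD x (by simp [hx])) hD'val
          have hlast : (d :: D').getLast (by simp) = 0 := by
            rw [List.getLast_cons hD']
            exact hall _ (List.getLast_mem hD')
          have := hcD (by simp) hlast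
          simp at this
          exact hD' this.2
      have := ih E' (fun x hx => hdD x (by simp [hx])) (fun x hx => hdE x (by simp [hx]))
        (pvCanon_tail d D' hcD) (pvCanon_tail e E' hcE) hval' hiff'
      rw [hde, this]

-- pvTrimA [] = []
theorem pvTrimA_nil : pvTrimA [] = [] := by rw [pvTrimA]; simp

-- ===== VERDICT (by name: the statement is the Claim_ definition above) =====
theorem carry_normalize_spec : Claim_equal_carry_normalize := by
  intro coeffs base hDom hPre
  unfold Spec_carry_normalize
  have hb : base ≠ 0 := by rcases hPre with ⟨h, _⟩ | h <;> omega
  -- A side: main pass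
  obtain ⟨Dm, cf, hmain, hlen, hdigm, hvalm⟩ := pvMainA_spec base hb coeffs 0 []
  simp only [List.nil_append] at hmain
  -- value identity
  have hV : pvVal base Dm + cf * base ^ Dm.length = pvVal base coeffs := by
    rw [hlen]; simpa using hvalm
  -- carry sign condition
  have hcf : (2 ≤ base ∧ 0 ≤ cf) ∨ base ≤ -2 := by
    rcases hPre with ⟨hb2, hVnn⟩ | h
    · left; refine ⟨hb2, ?_⟩
      have hbnds := pvVal_bounds base hb2 Dm hdigm
      have hpow : (0:Int) < base ^ Dm.length := pow_pos (by omega) _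
      nlinarith [hbnds.1, hbnds.2, hV]
    · exact Or.inr h
  obtain ⟨Ta, hTa⟩ := pvCarryLoopA_term base cf.natAbs cf Dm le_rfl hcf
  obtain ⟨TD, rfl, hTval, hTdig, hTempty, hTlast⟩ := pvCarryLoopA_sound base hb _ cf Dm _ hTa
  have hAeq : carry_normalize coeffs base = pvTrimA (Dm ++ TD) := by
    unfold carry_normalize
    rw [hmain]
    dsimp only
    rw [hTa]
  -- B side
  have hcond : (2 ≤ base ∧ 0 ≤ pvVal base coeffs) ∨ base ≤ -2 := hPre
  obtain ⟨Eb, hEb⟩ := pvCarryLoopA_term base (pvVal base coeffs).natAbs (pvVal base coeffs) [] le_rfl hcond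
  obtain ⟨ED', rfl, hEval, hEdig, hEempty, hElast⟩ := pvCarryLoopA_sound base hb _ _ [] _ hEb
  have hBeq : carry_normalize_alt coeffs base
      = if Eb ≠ [] then Eb else if coeffs ≠ [] then [0] else [] := by
    unfold carry_normalize_alt
    simp only [pvHornerB_val, pvDigitsB_eq, hEb]
  rw [hAeq, hBeq]
  -- full A digit list value
  have hfullval : pvVal base (Dm ++ TD) = pvVal base coeffs := by
    rw [pvVal_append, hTval]; linarith [hV]
  obtain ⟨htv, htm, htc, hte⟩ := pvTrimA_spec base (Dm ++ TD)
  by_cases hco : coeffs = []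
  · subst hco
    have hDm : Dm = [] := by simpa [List.length_eq_zero_iff] using hlen
    have hcf0 : cf = 0 := by
      subst hDm
      simpa [pvVal] using hV
    have hTD : TD = [] := hTempty.mpr hcf0
    have hEb : Eb = [] := hEempty.mpr (by simp [pvVal])
    simp [hDm, hTD, hEb, pvTrimA_nil]
  · -- coeffs ≠ []: both sides nonempty, apply uniqueness
    have hDmne : Dm ≠ [] := by
      intro h
      exact hco (by simpa [List.length_eq_zero_iff, h] using hlen.symm)
    have hAne : pvTrimA (Dm ++ TD) ≠ [] := by
      intro h
      have := hte.mp h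
      simp [hDmne] at this
    have hAdig : ∀ d ∈ pvTrimA (Dm ++ TD), pvDig base d := by
      intro d hd
      rcases List.mem_append.1 (htm d hd) with h | h
      · exact hdigm d h
      · exact hTdig d h
    by_cases hEb : Eb = []
    · -- value is 0, B returns [0]
      have hV0 : pvVal base coeffs = 0 := by rw [← hEval, hEb]; rfl
      simp only [hEb, ne_eq, not_true_eq_false, if_false, hco, not_false_eq_true, if_true]
      apply pvRep_unique base hb _ [0] hAdig ?_ htc ?_ ?_ ?_
      · intro d hd; simp at hd; subst hd; exact pvDig_zero base hb
      · intro h hl; rfl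
      · rw [htv, hfullval, hV0]; simp [pvVal]
      · simp [hAne]
    · simp only [hEb, ne_eq, not_false_eq_true, if_true]
      apply pvRep_unique base hb _ Eb hAdig hEdig htc ?_ ?_ ?_
      · intro h hl; exact absurd hl (hElast h)
      · rw [htv, hfullval, hEval]
      · simp [hAne, hEb]
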